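-- pv_equiv track=rewrite | github.com/andreirodriguez/tool-peds-technical-metrics-generator | cloud_development/app/common/Utils.py | getEnvironmentByResourceGroupName
-- ===== SOURCE A (Python) =====
-- def getEnvironmentByResourceGroupName(resourceGroupName:str) -> str:
--     lenght:int = len(resourceGroupName) - 1
--     character:str = resourceGroupName[lenght]
--
--     if(not character.isnumeric()): return "F"
--
--     while lenght >= 0:
--         character = resourceGroupName[lenght]
--
--         if(character.isnumeric()):
--             lenght-=1
--         else:
--             return character.upper()
-- ===== SOURCE B (Python) =====
-- def getEnvironmentByResourceGroupName(resourceGroupName: str) -> str: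
--     if not resourceGroupName[-1].isnumeric():
--         return "F"
--     last = None
--     for ch in resourceGroupName:
--         if not ch.isnumeric():
--             last = ch
--     if last is not None:
--         return last.upper()
-- ===== Notes on version B (the rewrite author's own statement) =====
-- stated objective: alternative
-- what changed: Replaces A's backward while-loop with negative-index decrement by a single forward fold that keeps the most recent non-numeric character and uppercases it at the end.
-- outside the precondition, e.g. on getEnvironmentByResourceGroupName('123'): A returns None, B returns None; on getEnvironmentByResourceGroupName(''): A raises IndexError, B raises IndexError
import Mathlib
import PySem

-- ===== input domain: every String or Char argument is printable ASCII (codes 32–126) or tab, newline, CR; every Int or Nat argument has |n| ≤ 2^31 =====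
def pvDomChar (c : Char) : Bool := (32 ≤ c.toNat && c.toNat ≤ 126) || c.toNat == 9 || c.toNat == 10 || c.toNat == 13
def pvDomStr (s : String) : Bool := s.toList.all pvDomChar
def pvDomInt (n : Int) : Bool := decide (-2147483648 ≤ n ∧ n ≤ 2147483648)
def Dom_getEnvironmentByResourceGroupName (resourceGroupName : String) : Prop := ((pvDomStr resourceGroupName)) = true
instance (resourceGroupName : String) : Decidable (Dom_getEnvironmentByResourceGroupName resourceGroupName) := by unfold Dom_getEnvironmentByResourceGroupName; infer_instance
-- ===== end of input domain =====

-- B replaces A's backward while-loop by a single forward fold keeping the last non-numeric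
-- character (alternative decomposition, same cost).


-- ===== PORT A =====
-- the while-loop: while lenght >= 0: character = s[lenght]; numeric → lenght -= 1; else return character.upper()
-- (none = the loop falls through, Python returns None; excluded by Pre_)
def pvLoopA (cs : List Char) (lenght : Int) : Option String :=
  if _h : 0 ≤ lenght then
    match PySem.List.pyGet? cs lenght with
    | none => none  -- IndexError; unreachable when lenght < len cs
    | some character =>
      if PySem.Chars.isdigit character then pvLoopA cs (lenght - 1)
      else some (String.mk (PySem.Chars.upper [character]))
  else none
termination_by (lenght + 1).toNat
decreasing_by omega

def getEnvironmentByResourceGroupName (resourceGroupName : String) : String :=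
  let cs := resourceGroupName.toList
  let lenght : Int := (cs.length : Int) - 1
  match PySem.List.pyGet? cs lenght with
  | none => ""  -- IndexError on the empty string; excluded by Pre_
  | some character =>
    if ¬ PySem.Chars.isdigit character then "F"
    else match pvLoopA cs lenght with
      | some r => r
      | none => ""  -- Python returns None here (all-numeric); excluded by Pre_

-- ===== PORT B =====
-- the body of B's for-loop: keep the most recent non-numeric character
def pvStep (acc : Option Char) (ch : Char) : Option Char :=
  if ¬ PySem.Chars.isdigit ch then some ch else acc

def getEnvironmentByResourceGroupName_alt (resourceGroupName : String) : String :=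
  let cs := resourceGroupName.toList
  match PySem.List.pyGet? cs (-1) with
  | none => ""  -- IndexError on the empty string; excluded by Pre_
  | some lastc =>
    if ¬ PySem.Chars.isdigit lastc then "F"
    else
      let last := cs.foldl pvStep none
      match last with
      | some c => String.mk (PySem.Chars.upper [c])
      | none => ""  -- Python returns None here (all-numeric); excluded by Pre_

-- ===== PRECONDITION & SPEC =====
-- Pre_ excludes the empty string, where A raises IndexError, and all-numeric strings, where A
-- falls off the loop and returns None, which is not a str.
def Pre_getEnvironmentByResourceGroupName (resourceGroupName : String) : Prop :=
  resourceGroupName.toList ≠ [] ∧ ¬ (resourceGroupName.toList.all PySem.Chars.isdigit = true)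
instance (resourceGroupName : String) : Decidable (Pre_getEnvironmentByResourceGroupName resourceGroupName) := by unfold Pre_getEnvironmentByResourceGroupName; infer_instance
def pvWitness_getEnvironmentByResourceGroupName : String := "rg1"

def Spec_getEnvironmentByResourceGroupName (resourceGroupName : String) (out : String) : Prop := out = getEnvironmentByResourceGroupName_alt resourceGroupName
instance (resourceGroupName : String) (out : String) : Decidable (Spec_getEnvironmentByResourceGroupName resourceGroupName out) := by unfold Spec_getEnvironmentByResourceGroupName; infer_instance

-- ===== CLAIM (what is proved, stated in full; the proofs are below) =====
def Claim_equal_getEnvironmentByResourceGroupName : Prop := ∀ (resourceGroupName : String), Dom_getEnvironmentByResourceGroupName resourceGroupName → Pre_getEnvironmentByResourceGroupName resourceGroupName → Spec_getEnvironmentByResourceGroupName resourceGroupName (getEnvironmentByResourceGroupName resourceGroupName)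

-- ===== LEMMAS AND PROOFS =====

-- one unfolding step of A's backward loop at a valid non-negative index
theorem pvLoopA_nat (cs : List Char) (i : Nat) (h : i < cs.length) :
    pvLoopA cs (i : Int) =
      if PySem.Chars.isdigit cs[i] then pvLoopA cs ((i : Int) - 1)
      else some (String.mk (PySem.Chars.upper [cs[i]])) := by
  rw [pvLoopA, dif_pos (Int.natCast_nonneg i)]
  simp only [PySem.List.pyGet?_natCast, List.getElem?_eq_getElem h]

-- A's backward loop from index i computes the last non-digit of the first i+1 characters, uppercased.
theorem pvLoopA_eq_fold (cs : List Char) (i : Nat) (h : i < cs.length) :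
    pvLoopA cs (i : Int) =
      ((cs.take (i+1)).foldl pvStep none).map (fun c => String.mk (PySem.Chars.upper [c])) := by
  induction i with
  | zero =>
    rw [pvLoopA_nat cs 0 h]
    have hnone : pvLoopA cs (-1) = none := by
      rw [pvLoopA, dif_neg (by omega)]
    have htake : cs.take 1 = [cs[0]] := by
      rw [List.take_one, List.head?_eq_getElem?, List.getElem?_eq_getElem h]
      simp
    rw [htake]
    by_cases hd : PySem.Chars.isdigit cs[0]
    · rw [if_pos hd, show ((0 : Nat) : Int) - 1 = (-1 : Int) by omega, hnone]
      simp [pvStep, hd]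
    · simp [hd, pvStep]
  | succ n ih =>
    rw [pvLoopA_nat cs (n+1) h]
    have hn : n < cs.length := by omega
    have htake : cs.take (n+1+1) = cs.take (n+1) ++ [cs[n+1]] := by
      rw [List.take_succ, List.getElem?_eq_getElem h]
      simp
    rw [htake, List.foldl_append]
    by_cases hd : PySem.Chars.isdigit cs[n+1]
    · rw [if_pos hd, show ((n+1 : Nat) : Int) - 1 = (n : Int) by push_cast; omega, ih hn]
      simp [pvStep, hd]
    · rw [if_neg hd]
      simp [pvStep, hd]

theorem fold_some_ne_none (rest : List Char) (x : Char) :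
    rest.foldl pvStep (some x) ≠ none := by
  induction rest generalizing x with
  | nil => simp
  | cons c rest ih =>
    by_cases hd : PySem.Chars.isdigit c
    · simpa [pvStep, hd] using ih x
    · simpa [pvStep, hd] using ih c

theorem fold_none_iff_all_digit (cs : List Char) :
    (cs.foldl pvStep none = none) ↔ cs.all PySem.Chars.isdigit = true := by
  induction cs with
  | nil => simp
  | cons c rest ih =>
    by_cases hd : PySem.Chars.isdigit c
    · simp [pvStep, hd, ih]
    · simp only [List.foldl_cons, pvStep, hd, not_false_eq_true, if_pos, List.all_cons]
      constructor
      · intro hcontra; exact absurd hcontra (fold_some_ne_none rest c)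
      · intro hcontra; simp [hd] at hcontra

-- ===== VERDICT (by name: the statement is the Claim_ definition above) =====
theorem getEnvironmentByResourceGroupName_spec : Claim_equal_getEnvironmentByResourceGroupName := by
  intro s _ hpre
  obtain ⟨hne, hnotall⟩ := hpre
  unfold Spec_getEnvironmentByResourceGroupName
  unfold getEnvironmentByResourceGroupName getEnvironmentByResourceGroupName_alt
  set cs := s.toList with hcs
  have hlen : 0 < cs.length := List.length_pos_of_ne_nil hne
  have hlast : PySem.List.pyGet? cs (-1) = some cs[cs.length - 1] := by
    rw [PySem.List.pyGet?_neg_one, List.getLast?_eq_getElem?]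
    simp [List.getElem?_eq_getElem (show cs.length - 1 < cs.length by omega)]
  have hidx : ((cs.length : Int) - 1) = ((cs.length - 1 : Nat) : Int) := by omega
  have htop : PySem.List.pyGet? cs ((cs.length : Int) - 1) = some cs[cs.length - 1] := by
    rw [hidx]
    exact PySem.List.pyGet?_ofNat (xs := cs) (n := cs.length - 1) (by omega)
  simp only [htop, hlast]
  by_cases hd : PySem.Chars.isdigit cs[cs.length - 1]
  · rw [if_neg (by simp [hd]), if_neg (by simp [hd])]
    rw [hidx, pvLoopA_eq_fold cs (cs.length - 1) (by omega)]
    rw [show cs.length - 1 + 1 = cs.length by omega, List.take_length]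
    cases hfold : cs.foldl pvStep none with
    | none => exact absurd ((fold_none_iff_all_digit cs).mp hfold) hnotall
    | some c => simp
  · simp [hd]
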